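-- pv_equiv track=rewrite | github.com/marcepanowyy/AlgorithmsDataStructures | practice/extra/leet_code/dp/palindromic_substrings.py | get_even
-- ===== SOURCE A (Python) =====
-- def get_even(str):
--     even = []
--     n = len(str)
--     for i in range(1, n):
--         left, right = i-1, i
--         while left >= 0 and right < n and str[left] == str[right]:
--             even.append(str[left:right+1])
--             left -= 1
--             right += 1
--     return even
-- ===== SOURCE B (Python) =====
-- def get_even(str):
--     n = len(str)
--     return [str[i - h:i + h]
--             for i in range(1, n)
--             for h in range(1, min(i, n - i) + 1)
--             if str[i - h:i + h] == str[i - h:i + h][::-1]]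
-- ===== Notes on version B (the rewrite author's own statement) =====
-- stated objective: idiomatic
-- what changed: A's incremental expand-from-center while loop (compare endpoint pair, break on mismatch) is replaced by a single list comprehension over centers and half-widths that verifies each candidate substring independently by slice reversal (sub == sub[::-1]).
import Mathlib
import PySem

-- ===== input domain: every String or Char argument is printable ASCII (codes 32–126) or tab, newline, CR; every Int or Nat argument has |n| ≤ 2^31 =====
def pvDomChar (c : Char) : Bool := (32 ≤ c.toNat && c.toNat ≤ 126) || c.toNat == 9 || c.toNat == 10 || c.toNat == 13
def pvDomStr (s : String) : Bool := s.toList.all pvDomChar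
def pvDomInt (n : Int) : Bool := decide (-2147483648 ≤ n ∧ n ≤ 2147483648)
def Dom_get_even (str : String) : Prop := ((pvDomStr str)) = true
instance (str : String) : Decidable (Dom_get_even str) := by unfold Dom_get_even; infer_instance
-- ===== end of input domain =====

-- B re-implements A as a single comprehension over centers and half-widths that tests each
-- candidate independently by slice reversal instead of A's incremental expand-and-break loop
-- (objective: idiomatic; same output list, same order).

-- ===== PORT A =====
-- A's inner while loop; the fuel only makes the recursion total (the loop body runs at most
-- len(s) times, since right strictly increases and the loop stops once right = n).
def getEvenLoop (s : List Char) (n : Int) : Nat → Int → Int → List String → List String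
  | 0, _, _, even => even
  | fuel+1, left, right, even =>
    if 0 ≤ left ∧ right < n ∧ PySem.List.pyGet? s left = PySem.List.pyGet? s right then
      getEvenLoop s n fuel (left - 1) (right + 1)
        (even ++ [String.ofList (PySem.List.slice s (some left) (some (right + 1)))])
    else even

def get_even (str : String) : List String :=
  let s := str.toList
  let n : Int := s.length
  (PySem.List.pyRange 1 n 1).foldl (fun even i => getEvenLoop s n (s.length + 1) (i - 1) i even) []

-- ===== PORT B =====
-- sub == sub[::-1] is ported as sub = sub.reverse (exact: PySem.List.slice?_none_none_neg_one).
def get_even_alt (str : String) : List String :=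
  let s := str.toList
  let n : Int := s.length
  (PySem.List.pyRange 1 n 1).flatMap (fun i =>
    (PySem.List.pyRange 1 (min i (n - i) + 1) 1).filterMap (fun h =>
      let sub := PySem.List.slice s (some (i - h)) (some (i + h))
      if sub = sub.reverse then some (String.ofList sub) else none))

-- ===== PRECONDITION & SPEC =====
def Spec_get_even (str : String) (out : List String) : Prop := out = get_even_alt str
instance (str : String) (out : List String) : Decidable (Spec_get_even str out) := by unfold Spec_get_even; infer_instance

-- ===== CLAIM (what is proved, stated in full; the proofs are below) =====
def Claim_equal_get_even : Prop := ∀ (str : String), Dom_get_even str → Spec_get_even str (get_even str)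

-- ===== LEMMAS AND PROOFS =====

-- does the pair at depth k around center i match (with A's bound checks)?
def pairB (s : List Char) (i k : Nat) : Bool :=
  (decide (k + 1 ≤ i) && decide (i + k < s.length)) && (s[i - 1 - k]? == s[i + k]?)

-- canonical value of the inner loop at center i, starting from depth k
def canon (s : List Char) (i : Nat) : Nat → Nat → List String
  | _, 0 => []
  | k, fuel+1 =>
    if pairB s i k then
      String.ofList ((s.drop (i - 1 - k)).take (2 * (k + 1))) :: canon s i (k + 1) fuel
    else []

lemma pairB_false_of_ge (s : List Char) (i k : Nat) (h2 : i < s.length)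
    (hk : min i (s.length - i) ≤ k) : pairB s i k = false := by
  unfold pairB
  simp only [Bool.and_eq_false_iff, decide_eq_false_iff_not]
  omega

lemma canon_fuel (s : List Char) (i : Nat) (h2 : i < s.length) :
    ∀ f1 f2 k, min i (s.length - i) ≤ k + f1 → min i (s.length - i) ≤ k + f2 →
      canon s i k f1 = canon s i k f2 := by
  intro f1
  induction f1 with
  | zero =>
    intro f2 k hk1 hk2
    match f2 with
    | 0 => rfl
    | g+1 => simp [canon, pairB_false_of_ge s i k h2 (by omega)]
  | succ f ih =>
    intro f2 k hk1 hk2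
    match f2 with
    | 0 => simp [canon, pairB_false_of_ge s i k h2 (by omega)]
    | g+1 =>
      simp only [canon]
      by_cases hp : pairB s i k
      · simp [hp, ih g (k+1) (by omega) (by omega)]
      · simp [hp]
lemma loopA_eq (s : List Char) (i : Nat) :
    ∀ (fuel k : Nat) (acc : List String),
      getEvenLoop s (s.length : Int) fuel ((i : Int) - 1 - (k : Int)) ((i : Int) + (k : Int)) acc
        = acc ++ canon s i k fuel := by
  intro fuel
  induction fuel with
  | zero => intro k acc; simp [getEvenLoop, canon]
  | succ f ih =>
    intro k acc
    by_cases hp : pairB s i k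
    · -- condition true
      have hki : k + 1 ≤ i := by
        by_contra h; simp [pairB] at hp; omega
      have hkn : i + k < s.length := by
        by_contra h; simp [pairB] at hp; omega
      have hc : s[i - 1 - k]? = s[i + k]? := by
        simp only [pairB, Bool.and_eq_true, beq_iff_eq, decide_eq_true_eq] at hp
        exact hp.2
      have e1 : (i : Int) - 1 - (k : Int) = ((i - 1 - k : Nat) : Int) := by omega
      have e2 : (i : Int) + (k : Int) = ((i + k : Nat) : Int) := by omega
      have cond : (0 ≤ (i:Int) - 1 - (k:Int) ∧ (i:Int) + (k:Int) < (s.length:Int) ∧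
          PySem.List.pyGet? s ((i:Int) - 1 - (k:Int)) = PySem.List.pyGet? s ((i:Int) + (k:Int))) := by
        refine ⟨by omega, by exact_mod_cast hkn, ?_⟩
        rw [e1, e2, PySem.List.pyGet?_natCast, PySem.List.pyGet?_natCast]
        exact hc
      rw [getEvenLoop, if_pos cond]
      have e3 : (i:Int) - 1 - (k:Int) - 1 = (i:Int) - 1 - ((k+1 : Nat) : Int) := by push_cast; ring
      have e4 : (i:Int) + (k:Int) + 1 = (i:Int) + ((k+1 : Nat) : Int) := by push_cast; ring
      rw [e3, e4, ih]
      have eslice : PySem.List.slice s (some ((i:Int) - 1 - (k:Int))) (some ((i:Int) + ((k + 1 : Nat) : Int)))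
          = (s.drop (i - 1 - k)).take (2 * (k + 1)) := by
        rw [e1]
        have e5 : (i:Int) + ((k + 1 : Nat) : Int) = ((i + k + 1 : Nat) : Int) := by push_cast; ring
        rw [e5, PySem.List.slice_natCast]
        congr 1
        omega
      rw [eslice]
      simp [canon, hp]
    · -- condition false
      have cond : ¬ (0 ≤ (i:Int) - 1 - (k:Int) ∧ (i:Int) + (k:Int) < (s.length:Int) ∧
          PySem.List.pyGet? s ((i:Int) - 1 - (k:Int)) = PySem.List.pyGet? s ((i:Int) + (k:Int))) := by
        intro ⟨c1, c2, c3⟩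
        apply hp
        have hki : k + 1 ≤ i := by omega
        have hkn : i + k < s.length := by exact_mod_cast c2
        have e1 : (i : Int) - 1 - (k : Int) = ((i - 1 - k : Nat) : Int) := by omega
        have e2 : (i : Int) + (k : Int) = ((i + k : Nat) : Int) := by omega
        rw [e1, e2, PySem.List.pyGet?_natCast, PySem.List.pyGet?_natCast] at c3
        simp [pairB, hki, hkn, c3]
      rw [getEvenLoop, if_neg cond]
      simp [canon, hp]

lemma pal_iff (s : List Char) (i h : Nat) (h1 : h ≤ i) (h2 : i + h ≤ s.length) :
    ((s.drop (i - h)).take (2 * h) = ((s.drop (i - h)).take (2 * h)).reverse)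
      ↔ ∀ j, j < h → s[i - 1 - j]? = s[i + j]? := by
  set l := (s.drop (i - h)).take (2 * h) with hl
  have llen : l.length = 2 * h := by
    simp [hl]; omega
  have lget : ∀ t, t < 2 * h → l[t]? = s[i - h + t]? := by
    intro t ht
    rw [hl, List.getElem?_take, if_pos ht, List.getElem?_drop]
  constructor
  · intro e j hj
    have g1 : l[h - 1 - j]? = s[i - 1 - j]? := by
      rw [lget (h - 1 - j) (by omega)]; congr 1; omega
    have g2 : l[h + j]? = s[i + j]? := by
      rw [lget (h + j) (by omega)]; congr 1; omega
    rw [← g1, ← g2]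
    calc l[h - 1 - j]? = l.reverse[h - 1 - j]? := by rw [← e]
      _ = l[l.length - 1 - (h - 1 - j)]? := List.getElem?_reverse (by omega)
      _ = l[h + j]? := by congr 1; omega
  · intro H
    apply List.ext_getElem?
    intro t
    by_cases ht : t < 2 * h
    · have hrev : l.reverse[t]? = l[2 * h - 1 - t]? := by
        rw [List.getElem?_reverse (by omega)]; congr 1; omega
      rw [hrev]
      by_cases hth : t < h
      · have hj := H (h - 1 - t) (by omega)
        rw [lget t ht, lget (2 * h - 1 - t) (by omega)]
        have e1 : i - h + t = i - 1 - (h - 1 - t) := by omega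
        have e2 : i - h + (2 * h - 1 - t) = i + (h - 1 - t) := by omega
        rw [e1, e2, hj]
      · have hj := H (t - h) (by omega)
        rw [lget t ht, lget (2 * h - 1 - t) (by omega)]
        have e1 : i - h + t = i + (t - h) := by omega
        have e2 : i - h + (2 * h - 1 - t) = i - 1 - (t - h) := by omega
        rw [e1, e2, hj]
    · rw [List.getElem?_eq_none (by omega), List.getElem?_eq_none (by simp [llen]; omega)]

lemma slice_center (s : List Char) (i : Nat) (h : Int) (hpos : 1 ≤ h) (hle : h ≤ (i : Int))
    (_hn : (i : Int) + h ≤ (s.length : Int)) :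
    PySem.List.slice s (some ((i : Int) - h)) (some ((i : Int) + h))
      = (s.drop (i - h.toNat)).take (2 * h.toNat) := by
  have e1 : (i : Int) - h = ((i - h.toNat : Nat) : Int) := by omega
  have e2 : (i : Int) + h = ((i + h.toNat : Nat) : Int) := by omega
  rw [e1, e2, PySem.List.slice_natCast]
  congr 1
  omega

lemma innerB_eq (s : List Char) (i : Nat) (_h1 : 1 ≤ i) (h2 : i < s.length) :
    ∀ (m k : Nat), k + m = min i (s.length - i) →
      (∀ j, j < k → s[i - 1 - j]? = s[i + j]?) →
      (PySem.List.pyRange ((k : Int) + 1) ((min i (s.length - i) : Nat) + 1 : Int) 1).filterMap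
        (fun h => (fun sub => if sub = sub.reverse then some (String.ofList sub) else none)
          (PySem.List.slice s (some ((i : Int) - h)) (some ((i : Int) + h))))
        = canon s i k m := by
  intro m
  induction m with
  | zero =>
    intro k hk H
    rw [PySem.List.pyRange_one_eq_nil (by omega)]
    rfl
  | succ m ih =>
    intro k hk H
    have hkM : k < min i (s.length - i) := by omega
    rw [PySem.List.pyRange_one_cons (by push_cast; omega)]
    have hsl : PySem.List.slice s (some ((i : Int) - ((k : Int) + 1))) (some ((i : Int) + ((k : Int) + 1)))
        = (s.drop (i - 1 - k)).take (2 * (k + 1)) := by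
      rw [slice_center s i ((k : Int) + 1) (by omega) (by omega) (by omega)]
      congr 2
      omega
    have hpal := pal_iff s i (k + 1) (by omega) (by omega)
    have hdis : i - (k + 1) = i - 1 - k := by omega
    rw [hdis] at hpal
    by_cases hc : s[i - 1 - k]? = s[i + k]?
    · have hpalT : (s.drop (i - 1 - k)).take (2 * (k + 1))
          = ((s.drop (i - 1 - k)).take (2 * (k + 1))).reverse := by
        rw [hpal]
        intro j hj
        rcases Nat.lt_or_ge j k with hjk | hjk
        · exact H j hjk
        · have : j = k := by omega
          rw [this]; exact hc
      have hfa : (fun h => (fun sub => if sub = sub.reverse then some (String.ofList sub) else none)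
            (PySem.List.slice s (some ((i : Int) - h)) (some ((i : Int) + h)))) ((k : Int) + 1)
          = some (String.ofList ((s.drop (i - 1 - k)).take (2 * (k + 1)))) := by
        dsimp only
        rw [hsl, if_pos hpalT]
      rw [List.filterMap_cons_some (f := fun h => (fun sub => if sub = sub.reverse then some (String.ofList sub) else none)
            (PySem.List.slice s (some ((i : Int) - h)) (some ((i : Int) + h)))) hfa]
      have hpb : pairB s i k = true := by
        simp only [pairB, Bool.and_eq_true, beq_iff_eq, decide_eq_true_eq]
        exact ⟨⟨by omega, by omega⟩, hc⟩
      rw [canon, if_pos hpb]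
      congr 1
      · have ecast : (k : Int) + 1 + 1 = ((k + 1 : Nat) : Int) + 1 := by push_cast; ring
        rw [ecast]
        apply ih (k + 1) (by omega)
        intro j hj
        rcases Nat.lt_or_ge j k with hjk | hjk
        · exact H j hjk
        · have : j = k := by omega
          rw [this]; exact hc
    · have hpalF : ¬ ((s.drop (i - 1 - k)).take (2 * (k + 1))
          = ((s.drop (i - 1 - k)).take (2 * (k + 1))).reverse) := by
        rw [hpal]
        intro Hall
        exact hc (Hall k (by omega))
      have hfa : (fun h => (fun sub => if sub = sub.reverse then some (String.ofList sub) else none)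
            (PySem.List.slice s (some ((i : Int) - h)) (some ((i : Int) + h)))) ((k : Int) + 1)
          = none := by
        dsimp only
        rw [hsl, if_neg hpalF]
      rw [List.filterMap_cons_none (f := fun h => (fun sub => if sub = sub.reverse then some (String.ofList sub) else none)
            (PySem.List.slice s (some ((i : Int) - h)) (some ((i : Int) + h)))) hfa]
      have hpb : pairB s i k = false := by
        simp only [pairB, Bool.and_eq_false_iff, decide_eq_false_iff_not, beq_eq_false_iff_ne]
        right; exact hc
      rw [canon, if_neg (by simp [hpb])]
      rw [List.filterMap_eq_nil_iff]
      intro x hx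
      rw [PySem.List.mem_pyRange_one] at hx
      obtain ⟨hx1, hx2⟩ := hx
      have hxpos : 1 ≤ x := by omega
      have hxle : x ≤ (min i (s.length - i) : Nat) := by omega
      rw [slice_center s i x (by omega) (by omega) (by omega)]
      have hnotpal : ¬ ((s.drop (i - x.toNat)).take (2 * x.toNat)
          = ((s.drop (i - x.toNat)).take (2 * x.toNat)).reverse) := by
        rw [pal_iff s i x.toNat (by omega) (by omega)]
        intro Hall
        exact hc (Hall k (by omega))
      simp only [hnotpal, if_false]

lemma inner_eq (s : List Char) (i : Nat) (h1 : 1 ≤ i) (h2 : i < s.length) (acc : List String) :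
    getEvenLoop s (s.length : Int) (s.length + 1) ((i : Int) - 1) (i : Int) acc
      = acc ++ (PySem.List.pyRange 1 (min (i : Int) ((s.length : Int) - (i : Int)) + 1) 1).filterMap
          (fun h => (fun sub => if sub = sub.reverse then some (String.ofList sub) else none)
            (PySem.List.slice s (some ((i : Int) - h)) (some ((i : Int) + h)))) := by
  have hA := loopA_eq s i (s.length + 1) 0 acc
  simp only [Nat.cast_zero, sub_zero, add_zero] at hA
  rw [hA]
  have emin : min (i : Int) ((s.length : Int) - (i : Int)) = ((min i (s.length - i) : Nat) : Int) := by
    omega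
  have hB := innerB_eq s i h1 h2 (min i (s.length - i)) 0 (by omega) (by omega)
  simp only [Nat.cast_zero, zero_add] at hB
  rw [emin, hB]
  congr 1
  exact canon_fuel s i h2 (s.length + 1) (min i (s.length - i)) 0 (by omega) (by omega)

-- ===== VERDICT (by name: the statement is the Claim_ definition above) =====
theorem get_even_spec : Claim_equal_get_even := by
  intro str _
  unfold Spec_get_even get_even get_even_alt
  dsimp only
  rw [PySem.List.foldl_congr_mem _
      (fun even i => getEvenLoop str.toList (str.toList.length : Int) (str.toList.length + 1) (i - 1) i even)
      (fun even i => even ++ (PySem.List.pyRange 1 (min i ((str.toList.length : Int) - i) + 1) 1).filterMap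
        (fun h => (fun sub => if sub = sub.reverse then some (String.ofList sub) else none)
          (PySem.List.slice str.toList (some (i - h)) (some (i + h)))))
      [] ?_]
  · rw [PySem.List.foldl_append_eq_flatMap]
    rfl
  · intro acc x hx
    rw [PySem.List.mem_pyRange_one] at hx
    obtain ⟨hx1, hx2⟩ := hx
    have hxe : x = ((x.toNat : Nat) : Int) := by omega
    rw [hxe]
    exact inner_eq str.toList x.toNat (by omega) (by omega) acc
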